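-- pv_equiv track=rewrite | github.com/yagoliz/tpms-tools | src/tpms_tools/encoders/manchester.py | manchester_decode
-- ===== SOURCE A (Python) =====
-- from typing import Tuple
--
-- def manchester_decode(bits: str, start: int = 0, max_bits: int = 0) -> Tuple[str, int]:
--     """
--     Decodes a Manchester-encoded bit string starting from 'start'.
--
--     Manchester encoding represents each bit using a pair of bits (with the two bits complementary).
--     The decoded bit is taken as the second bit in the pair.
--
--     Args:
--         bit_str: A string of '1' and '0' representing Manchester-encoded bits.
--         start: The starting bit index for decoding.
--         max_bits: If non-zero, limits decoding to max_bits output bits (i.e. max_bits pairs).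
--
--     Returns:
--         A tuple (decoded_str, ipos) where:
--         - decoded_str is the Manchester-decoded bit string.
--         - ipos is the final bit index processed in the input.
--
--     Decoding stops if a pair with identical bits is encountered.
--     """
--     decoded = []
--     ipos = start
--     length = len(bits)
--     # If max_bits is specified, limit the length to the required number of pairs.
--     if max_bits and length > start + (max_bits * 2):
--         length = start + (max_bits * 2)
--
--     while ipos <= length - 2:  # require at least 2 bits for a pair
--         bit1 = bits[ipos]
--         bit2 = bits[ipos + 1]
--         ipos += 2
--
--         # If both bits are the same, it's an error or termination condition.
--         if bit1 == bit2:
--             break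
--
--         decoded.append(bit2)
--
--     return "".join(decoded), ipos
-- ===== SOURCE B (Python) =====
-- def manchester_decode(bits: str, start: int = 0, max_bits: int = 0):
--     length = len(bits)
--     if max_bits and length > start + max_bits * 2:
--         length = start + max_bits * 2
--     pairs = [(bits[i], bits[i + 1]) for i in range(start, length - 1, 2)]
--     j = next((k for k, (b1, b2) in enumerate(pairs) if b1 == b2), None)
--     if j is None:
--         return "".join(b2 for _, b2 in pairs), start + 2 * len(pairs)
--     return "".join(b2 for _, b2 in pairs[:j]), start + 2 * (j + 1)
-- ===== Notes on version B (the rewrite author's own statement) =====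
-- stated objective: alternative
-- what changed: A's stateful while-loop mutating (decoded, ipos) is replaced by building the list of bit pairs over range(start, length-1, 2) once, locating the first invalid pair with next/enumerate, and deriving the decoded string and final position from that index by slicing and arithmetic.
import Mathlib
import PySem

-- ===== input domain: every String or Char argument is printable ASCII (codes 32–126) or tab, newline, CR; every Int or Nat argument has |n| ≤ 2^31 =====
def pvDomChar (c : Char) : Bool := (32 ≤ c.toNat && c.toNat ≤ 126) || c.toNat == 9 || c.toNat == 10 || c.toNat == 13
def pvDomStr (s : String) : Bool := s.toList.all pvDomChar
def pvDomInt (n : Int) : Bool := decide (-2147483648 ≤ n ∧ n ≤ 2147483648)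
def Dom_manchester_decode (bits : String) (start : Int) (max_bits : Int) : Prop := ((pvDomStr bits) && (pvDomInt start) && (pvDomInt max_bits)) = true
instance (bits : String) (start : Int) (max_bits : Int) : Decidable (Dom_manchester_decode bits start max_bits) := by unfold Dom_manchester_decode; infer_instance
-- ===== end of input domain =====

-- B replaces A's mutating while-loop by building the pair sequence over range(start, length-1, 2)
-- once and locating the first invalid pair with a search (objective: alternative decomposition).

-- ===== PORT A =====
-- A's while-loop: state (decoded, ipos), stop at the first equal pair.  bits[i] is ported as
-- PySem.List.pyGetD; Python raises IndexError for an index below -len, exactly the inputs Pre_ excludes.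
def mdLoopA (cs : List Char) (length : Int) (ipos : Int) (decoded : List Char) : List Char × Int :=
  if _h : ipos ≤ length - 2 then
    let bit1 := PySem.List.pyGetD cs ipos ' '
    let bit2 := PySem.List.pyGetD cs (ipos + 1) ' '
    if bit1 == bit2 then (decoded, ipos + 2)
    else mdLoopA cs length (ipos + 2) (decoded ++ [bit2])
  else (decoded, ipos)
termination_by (length - ipos).toNat
decreasing_by omega

def manchester_decode (bits : String) (start : Int) (max_bits : Int) : String × Int :=
  let cs := bits.toList
  let length0 : Int := PySem.Str.len bits
  let length : Int :=
    if max_bits ≠ 0 ∧ length0 > start + max_bits * 2 then start + max_bits * 2 else length0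
  let r := mdLoopA cs length start []
  (String.ofList r.1, r.2)

-- ===== PORT B =====
-- the pair (bits[i], bits[i+1]) for each i of range(start, length-1, 2)
def mdPairs (cs : List Char) (length : Int) (ipos : Int) : List (Char × Char) :=
  (PySem.List.pyRange ipos (length - 1) 2).map
    (fun i => (PySem.List.pyGetD cs i ' ', PySem.List.pyGetD cs (i + 1) ' '))

def manchester_decode_alt (bits : String) (start : Int) (max_bits : Int) : String × Int :=
  let cs := bits.toList
  let len0 : Int := PySem.Str.len bits
  let length : Int :=
    if max_bits ≠ 0 ∧ len0 > start + max_bits * 2 then start + max_bits * 2 else len0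
  let pairs := mdPairs cs length start
  match pairs.findIdx? (fun p => p.1 == p.2) with
  | none => (String.ofList (pairs.map (·.2)), start + 2 * (pairs.length : Int))
  | some j => (String.ofList ((pairs.take j).map (·.2)), start + 2 * ((j : Int) + 1))

-- ===== PRECONDITION & SPEC =====
-- Pre_ excludes exactly the inputs on which Python A raises IndexError (the loop runs and its first
-- access bits[start] has start below -len(bits)); Python B raises IndexError there identically.
def Pre_manchester_decode (bits : String) (start : Int) (max_bits : Int) : Prop :=
  ¬ (start < -(PySem.Str.len bits) ∧
      start ≤ (if max_bits ≠ 0 ∧ PySem.Str.len bits > start + max_bits * 2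
               then start + max_bits * 2 else PySem.Str.len bits) - 2)
instance (bits : String) (start : Int) (max_bits : Int) : Decidable (Pre_manchester_decode bits start max_bits) := by unfold Pre_manchester_decode; infer_instance

def pvWitness_manchester_decode : String × Int × Int := ("0110", 0, 0)

def Spec_manchester_decode (bits : String) (start : Int) (max_bits : Int) (out : String × Int) : Prop := out = manchester_decode_alt bits start max_bits
instance (bits : String) (start : Int) (max_bits : Int) (out : String × Int) : Decidable (Spec_manchester_decode bits start max_bits out) := by unfold Spec_manchester_decode; infer_instance

-- ===== CLAIM (what is proved, stated in full; the proofs are below) =====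
def Claim_equal_manchester_decode : Prop := ∀ (bits : String) (start : Int) (max_bits : Int), Dom_manchester_decode bits start max_bits → Pre_manchester_decode bits start max_bits → Spec_manchester_decode bits start max_bits (manchester_decode bits start max_bits)

-- ===== LEMMAS AND PROOFS =====

theorem pyRange_two_nil (a b : Int) (h : b ≤ a) : PySem.List.pyRange a b 2 = [] := by
  rw [PySem.List.pyRange_of_pos _ _ (by norm_num)]
  simp [if_neg (by omega : ¬ a < b)]

theorem pyRange_two_cons (a b : Int) (h : a < b) :
    PySem.List.pyRange a b 2 = a :: PySem.List.pyRange (a + 2) b 2 := by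
  rw [PySem.List.pyRange_of_pos _ _ (by norm_num), PySem.List.pyRange_of_pos _ _ (by norm_num)]
  have hc : (if a < b then ((b - a + 2 - 1) / 2).toNat else 0)
      = (if a + 2 < b then ((b - (a + 2) + 2 - 1) / 2).toNat else 0) + 1 := by
    split_ifs <;> omega
  rw [hc, List.range_succ_eq_map]
  simp only [List.map_cons, List.map_map, Nat.cast_zero, mul_zero, add_zero]
  refine congrArg (a :: ·) (List.map_congr_left ?_)
  intro k _
  simp only [Function.comp_apply]
  push_cast
  ring

theorem mdPairs_nil (cs : List Char) (length ipos : Int) (h : ¬ ipos ≤ length - 2) :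
    mdPairs cs length ipos = [] := by
  unfold mdPairs
  rw [pyRange_two_nil _ _ (by omega)]
  rfl

theorem mdPairs_cons (cs : List Char) (length ipos : Int) (h : ipos ≤ length - 2) :
    mdPairs cs length ipos
      = (PySem.List.pyGetD cs ipos ' ', PySem.List.pyGetD cs (ipos + 1) ' ')
        :: mdPairs cs length (ipos + 2) := by
  unfold mdPairs
  rw [pyRange_two_cons _ _ (by omega)]
  rfl

-- loop invariant: A's while-loop from ipos equals B's pair-search over the pairs from ipos
theorem mdLoopA_eq_pairs (cs : List Char) (length : Int) :
    ∀ (ipos : Int) (acc : List Char),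
      mdLoopA cs length ipos acc =
        (match (mdPairs cs length ipos).findIdx? (fun p => p.1 == p.2) with
         | none => (acc ++ (mdPairs cs length ipos).map (·.2),
                    ipos + 2 * ((mdPairs cs length ipos).length : Int))
         | some j => (acc ++ ((mdPairs cs length ipos).take j).map (·.2),
                    ipos + 2 * ((j : Int) + 1))) := by
  intro ipos acc
  induction ipos, acc using mdLoopA.induct cs length with
  | case3 ipos acc h =>
    rw [mdLoopA, dif_neg h, mdPairs_nil cs length ipos h]
    simp
  | case1 ipos acc h b1 b2 heq =>
    rw [mdLoopA, dif_pos h, mdPairs_cons cs length ipos h]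
    simp only [List.findIdx?_cons]
    rw [if_pos heq, if_pos heq]
    simp
  | case2 ipos acc h b1 b2 hne ih =>
    rw [mdLoopA, dif_pos h, mdPairs_cons cs length ipos h]
    simp only [List.findIdx?_cons]
    rw [if_neg hne, if_neg hne, ih]
    cases hfi : (mdPairs cs length (ipos + 2)).findIdx? (fun p => p.1 == p.2) with
    | none =>
      simp only [Option.map_none]
      refine Prod.ext ?_ ?_
      · simp
        rfl
      · simp
        ring
    | some j =>
      simp only [Option.map_some]
      refine Prod.ext ?_ ?_
      · simp [List.take_succ_cons]
        rfl
      · simp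
        ring

-- ===== VERDICT (by name: the statement is the Claim_ definition above) =====
theorem manchester_decode_spec : Claim_equal_manchester_decode := by
  intro bits start max_bits _ _
  unfold Spec_manchester_decode manchester_decode manchester_decode_alt
  simp only [mdLoopA_eq_pairs]
  cases hfi : (mdPairs bits.toList
      (if max_bits ≠ 0 ∧ PySem.Str.len bits > start + max_bits * 2
       then start + max_bits * 2 else PySem.Str.len bits) start).findIdx? (fun p => p.1 == p.2) <;>
    simp only [hfi] <;> simp
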